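-- pv_equiv track=rewrite | github.com/Mahmoudamin11/Socail-Hub-backend | CommentToxicity-main/Main.py | check_sensitivity
-- ===== SOURCE A (Python) =====
-- def check_sensitivity(input_sentence, sexual_words, violence_words, threat_words):
--     sensitivity_results = []
--     words = input_sentence.lower().split()
--     for word in words:
--         sensitivity = None
--         if word in sexual_words:
--             sensitivity = 'Sexual'
--         elif word in violence_words:
--             sensitivity = 'Violence'
--         elif word in threat_words:
--             sensitivity = 'Threat'
--         sensitivity_results.append((word, sensitivity))
--     return sensitivity_results
-- ===== SOURCE B (Python) =====
-- def check_sensitivity(input_sentence, sexual_words, violence_words, threat_words):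
--     words = input_sentence.lower().split()
--     positions = {}
--     for i, w in enumerate(words):
--         positions.setdefault(w, []).append(i)
--     tags = [None] * len(words)
--     for category, vocab in (('Threat', threat_words), ('Violence', violence_words), ('Sexual', sexual_words)):
--         for w in vocab:
--             for i in positions.get(w, []):
--                 tags[i] = category
--     return list(zip(words, tags))
-- ===== Notes on version B (the rewrite author's own statement) =====
-- stated objective: alternative
-- what changed: B inverts the control flow: it builds an inverted index word->occurrence positions in one pass, then iterates the three vocabulary lists (threat, violence, sexual in that order) stamping the category onto a tag array at the indexed positions so the later, higher-priority pass overwrites; A's per-word membership branch chain disappears entirely.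
import Mathlib
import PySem

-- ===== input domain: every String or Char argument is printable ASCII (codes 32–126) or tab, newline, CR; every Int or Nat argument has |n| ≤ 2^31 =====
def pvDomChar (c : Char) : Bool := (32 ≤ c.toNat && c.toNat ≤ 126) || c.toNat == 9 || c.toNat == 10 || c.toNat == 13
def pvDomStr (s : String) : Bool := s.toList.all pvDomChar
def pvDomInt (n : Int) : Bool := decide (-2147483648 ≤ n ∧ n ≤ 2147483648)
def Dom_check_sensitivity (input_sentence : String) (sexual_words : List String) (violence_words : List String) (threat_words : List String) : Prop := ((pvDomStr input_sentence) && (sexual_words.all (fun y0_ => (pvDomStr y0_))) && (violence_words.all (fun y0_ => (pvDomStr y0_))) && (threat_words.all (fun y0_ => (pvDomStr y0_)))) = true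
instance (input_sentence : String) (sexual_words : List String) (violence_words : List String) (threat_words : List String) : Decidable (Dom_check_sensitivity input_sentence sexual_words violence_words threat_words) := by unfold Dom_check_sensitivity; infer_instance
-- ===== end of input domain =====

-- B replaces A's per-word membership branch chain by an inverted index (word → occurrence
-- positions) driven by the vocabulary lists, with priority resolved by overwrite order.

-- ===== PORT A =====
def check_sensitivity (input_sentence : String) (sexual_words : List String) (violence_words : List String) (threat_words : List String) : List (String × Option String) :=
  let words := PySem.Str.split₀ (PySem.Str.lower input_sentence)
  words.foldl (fun sensitivity_results word =>
    let sensitivity : Option String :=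
      if sexual_words.contains word then some "Sexual"
      else if violence_words.contains word then some "Violence"
      else if threat_words.contains word then some "Threat"
      else none
    sensitivity_results ++ [(word, sensitivity)]) []

-- ===== PORT B =====
-- positions.setdefault(w, []).append(i)  =  d.modify w [] (· ++ [i])
def check_sensitivity_alt (input_sentence : String) (sexual_words : List String) (violence_words : List String) (threat_words : List String) : List (String × Option String) :=
  let words := PySem.Str.split₀ (PySem.Str.lower input_sentence)
  let positions : PySem.Dict String (List Int) :=
    (PySem.List.enumerate words 0).foldl (fun d p => d.modify p.2 [] (· ++ [p.1])) PySem.Dict.empty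
  let tags0 : List (Option String) := List.replicate words.length none
  let tags := [("Threat", threat_words), ("Violence", violence_words), ("Sexual", sexual_words)].foldl
    (fun tags cv => cv.2.foldl
      (fun t w => (positions.getD w []).foldl (fun t i => PySem.List.pySetD t i (some cv.1)) t) tags) tags0
  words.zip tags

-- ===== PRECONDITION & SPEC =====
def Spec_check_sensitivity (input_sentence : String) (sexual_words : List String) (violence_words : List String) (threat_words : List String) (out : List (String × Option String)) : Prop := out = check_sensitivity_alt input_sentence sexual_words violence_words threat_words
instance (input_sentence : String) (sexual_words : List String) (violence_words : List String) (threat_words : List String) (out : List (String × Option String)) : Decidable (Spec_check_sensitivity input_sentence sexual_words violence_words threat_words out) := by unfold Spec_check_sensitivity; infer_instance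

-- ===== CLAIM (what is proved, stated in full; the proofs are below) =====
def Claim_equal_check_sensitivity : Prop := ∀ (input_sentence : String) (sexual_words : List String) (violence_words : List String) (threat_words : List String), Dom_check_sensitivity input_sentence sexual_words violence_words threat_words → Spec_check_sensitivity input_sentence sexual_words violence_words threat_words (check_sensitivity input_sentence sexual_words violence_words threat_words)

-- ===== LEMMAS AND PROOFS =====

-- the inverted index lists exactly the occurrence positions of each word
lemma positions_getD (ws : List String) (w : String) :
    (((PySem.List.enumerate ws 0).foldl (fun d p => d.modify p.2 [] (· ++ [p.1]))
      (PySem.Dict.empty : PySem.Dict String (List Int))).getD w [])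
    = (((PySem.List.enumerate ws 0).map Prod.swap).filter (fun p => p.1 == w)).map (·.2) := by
  have h := PySem.Dict.getD_foldl_modify_append ((PySem.List.enumerate ws 0).map Prod.swap)
    (PySem.Dict.empty : PySem.Dict String (List Int)) w
  simp only [List.foldl_map, Prod.fst_swap, Prod.snd_swap] at h
  simpa using h

lemma mem_positions (ws : List String) (w : String) (k : Nat) :
    ((k : Int) ∈ (((PySem.List.enumerate ws 0).foldl (fun d p => d.modify p.2 [] (· ++ [p.1]))
      (PySem.Dict.empty : PySem.Dict String (List Int))).getD w []))
    ↔ (k < ws.length ∧ ws[k]? = some w) := by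
  rw [positions_getD]
  constructor
  · intro h
    obtain ⟨p, hp, hpk⟩ := List.mem_map.1 h
    obtain ⟨hpmem, hpw⟩ := List.mem_filter.1 hp
    obtain ⟨q, hq, rfl⟩ := List.mem_map.1 hpmem
    obtain ⟨j, hj, rfl⟩ := (PySem.List.mem_enumerate_iff ws 0 q).1 hq
    simp only [Prod.swap_prod_mk, beq_iff_eq] at hpk hpw
    have hjk : j = k := by omega
    subst hjk
    exact ⟨hj, by rw [List.getElem?_eq_getElem hj, hpw]⟩
  · rintro ⟨hk, hw⟩
    have hw' : ws[k] = w := by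
      rw [List.getElem?_eq_getElem hk] at hw; exact Option.some.inj hw
    refine List.mem_map.2 ⟨(w, (k : Int)), List.mem_filter.2 ⟨List.mem_map.2
      ⟨((k : Int), ws[k]), (PySem.List.mem_enumerate_iff ws 0 _).2 ⟨k, hk, by simp⟩, by simp [hw']⟩,
      by simp⟩, rfl⟩

lemma positions_nonneg (ws : List String) (w : String) (i : Int)
    (h : i ∈ (((PySem.List.enumerate ws 0).foldl (fun d p => d.modify p.2 [] (· ++ [p.1]))
      (PySem.Dict.empty : PySem.Dict String (List Int))).getD w [])) : 0 ≤ i := by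
  rw [positions_getD] at h
  obtain ⟨p, hp, rfl⟩ := List.mem_map.1 h
  obtain ⟨hpmem, _⟩ := List.mem_filter.1 hp
  obtain ⟨q, hq, rfl⟩ := List.mem_map.1 hpmem
  obtain ⟨j, hj, rfl⟩ := (PySem.List.mem_enumerate_iff ws 0 q).1 hq
  simp

lemma mark_length (idxs : List Int) (t : List (Option String)) (cat : String) :
    (idxs.foldl (fun t i => PySem.List.pySetD t i (some cat)) t).length = t.length := by
  induction idxs generalizing t with
  | nil => rfl
  | cons i rest ih => simp [List.foldl_cons, ih, PySem.List.length_pySetD]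

lemma mark_getElem? (idxs : List Int) (t : List (Option String)) (cat : String) (k : Nat)
    (hnn : ∀ i ∈ idxs, 0 ≤ i) :
    (idxs.foldl (fun t i => PySem.List.pySetD t i (some cat)) t)[k]?
      = if (k : Int) ∈ idxs ∧ k < t.length then some (some cat) else t[k]? := by
  induction idxs generalizing t with
  | nil => simp
  | cons i rest ih =>
    have hi : 0 ≤ i := hnn i (List.mem_cons_self ..)
    have hrest : ∀ j ∈ rest, 0 ≤ j := fun j hj => hnn j (List.mem_cons_of_mem _ hj)
    simp only [List.foldl_cons]
    rw [ih _ hrest, PySem.List.pySetD_of_nonneg _ _ hi]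
    rw [List.length_set, List.getElem?_set]
    have hik : (i.toNat = k) ↔ ((k : Int) = i) := by omega
    by_cases hm : (k : Int) ∈ rest
    · by_cases hk : k < t.length
      · simp [hm, hk, List.mem_cons]
      · have hnone : t[k]? = none := List.getElem?_eq_none (by omega)
        by_cases he : i.toNat = k
        · simp [hm, hk, List.mem_cons, he]
        · simp [hm, hk, List.mem_cons, he]
    · by_cases he : (k : Int) = i
      · have he' : i.toNat = k := hik.2 he
        by_cases hk : k < t.length
        · simp [List.mem_cons, he, he', hk]
        · have hnone : t[k]? = none := List.getElem?_eq_none (by omega)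
          simp [List.mem_cons, he, he', hk]
      · have he' : i.toNat ≠ k := fun h => he (hik.1 h)
        simp [hm, List.mem_cons, he, he']

-- one stamping pass over a vocabulary list
lemma pass_length (ws : List String) (vocab : List String) (cat : String) (tags : List (Option String)) :
    (vocab.foldl (fun t w =>
        ((((PySem.List.enumerate ws 0).foldl (fun d p => d.modify p.2 [] (· ++ [p.1]))
          (PySem.Dict.empty : PySem.Dict String (List Int))).getD w []).foldl
          (fun t i => PySem.List.pySetD t i (some cat)) t)) tags).length = tags.length := by
  induction vocab generalizing tags with
  | nil => rfl
  | cons w rest ih => simp [List.foldl_cons, ih, mark_length]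

lemma pass_getElem? (ws : List String) (vocab : List String) (cat : String)
    (tags : List (Option String)) (hlen : tags.length = ws.length) (k : Nat) (hk : k < ws.length) :
    (vocab.foldl (fun t w =>
        ((((PySem.List.enumerate ws 0).foldl (fun d p => d.modify p.2 [] (· ++ [p.1]))
          (PySem.Dict.empty : PySem.Dict String (List Int))).getD w []).foldl
          (fun t i => PySem.List.pySetD t i (some cat)) t)) tags)[k]?
      = if ws[k] ∈ vocab then some (some cat) else tags[k]? := by
  induction vocab generalizing tags with
  | nil => simp
  | cons w rest ih =>
    simp only [List.foldl_cons]
    have hlen' : (((((PySem.List.enumerate ws 0).foldl (fun d p => d.modify p.2 [] (· ++ [p.1]))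
        (PySem.Dict.empty : PySem.Dict String (List Int))).getD w []).foldl
        (fun t i => PySem.List.pySetD t i (some cat)) tags)).length = ws.length := by
      rw [mark_length]; exact hlen
    rw [ih _ hlen']
    rw [mark_getElem? _ _ _ _ (fun i hi => positions_nonneg ws w i hi)]
    have hkt : k < tags.length := by omega
    have hget : ws[k]? = some ws[k] := List.getElem?_eq_getElem hk
    have hP : ((k : Int) ∈ (((PySem.List.enumerate ws 0).foldl
        (fun d p => d.modify p.2 [] (· ++ [p.1]))
        (PySem.Dict.empty : PySem.Dict String (List Int))).getD w [])) ↔ ws[k] = w := by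
      rw [mem_positions, hget]
      constructor
      · rintro ⟨_, h⟩; exact Option.some.inj h
      · intro h; exact ⟨hk, by rw [h]⟩
    by_cases hm : ws[k] ∈ rest
    · simp [hm, List.mem_cons]
    · by_cases he : ws[k] = w
      · simp [he, hP.2 he, hkt, List.mem_cons]
      · have hno : ¬ (((k : Int) ∈ (((PySem.List.enumerate ws 0).foldl
            (fun d p => d.modify p.2 [] (· ++ [p.1]))
            (PySem.Dict.empty : PySem.Dict String (List Int))).getD w [])) ∧ k < tags.length) :=
          fun hc => he (hP.1 hc.1)
        simp [List.mem_cons, hm, he, hno]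

-- ===== VERDICT (by name: the statement is the Claim_ definition above) =====
theorem check_sensitivity_spec : Claim_equal_check_sensitivity := by
  intro input_sentence sx vi th _
  unfold Spec_check_sensitivity check_sensitivity check_sensitivity_alt
  simp only [PySem.List.foldl_append_singleton_eq_map, List.nil_append, List.foldl_cons,
    List.foldl_nil]
  set ws := PySem.Str.split₀ (PySem.Str.lower input_sentence) with hws
  apply List.ext_getElem
  · simp [pass_length]
  · intro k h1 h2
    have hk : k < ws.length := by simpa using h1
    rw [List.getElem_map, List.getElem_zip]
    have hl0 : (List.replicate ws.length (none : Option String)).length = ws.length :=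
      List.length_replicate
    have l3 := (pass_length ws th "Threat" (List.replicate ws.length none)).trans hl0
    have l2 := (pass_length ws vi "Violence" _).trans l3
    have hfin := (pass_length ws sx "Sexual" _).trans l2
    have ht := pass_getElem? ws sx "Sexual" _ l2 k hk
    rw [pass_getElem? ws vi "Violence" _ l3 k hk] at ht
    rw [pass_getElem? ws th "Threat" _ hl0 k hk] at ht
    rw [List.getElem?_replicate] at ht
    have hkf := lt_of_lt_of_eq hk hfin.symm
    rw [List.getElem?_eq_getElem hkf] at ht
    simp only [Prod.mk.injEq]
    refine ⟨trivial, ?_⟩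
    by_cases hs : ws[k] ∈ sx <;> by_cases hv : ws[k] ∈ vi <;> by_cases hmt : ws[k] ∈ th <;>
      simp [hs, hv, hmt, hk] at ht <;>
      simp [List.contains_eq_mem, hs, hv, hmt, ht]
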